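-- pv_equiv track=rewrite | github.com/lumatic2/agent-orchestration | scripts/notion_db.py | _find_property_by_candidates
-- ===== SOURCE A (Python) =====
-- def _norm_key(key: str) -> str:
--     return "".join(ch for ch in key.lower().strip() if ch.isalnum())
--
-- def _find_property_by_candidates(properties: dict, candidates: list[str]) -> str | None:
--     normalized = {_norm_key(k): k for k in properties.keys()}
--     for candidate in candidates:
--         if not candidate:
--             continue
--         key = _norm_key(candidate)
--         if key in normalized:
--             return normalized[key]
--     return None
-- ===== SOURCE B (Python) =====
-- def _norm_key(key: str) -> str:
--     return "".join(ch for ch in key.lower().strip() if ch.isalnum())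
--
-- def _find_property_by_candidates(properties: dict, candidates: list[str]) -> str | None:
--     for candidate in candidates:
--         if not candidate:
--             continue
--         key = _norm_key(candidate)
--         match = None
--         for k in properties.keys():
--             if _norm_key(k) == key:
--                 match = k
--         if match is not None:
--             return match
--     return None
-- ===== Notes on version B (the rewrite author's own statement) =====
-- stated objective: alternative
-- what changed: Drops the precomputed normalized-key dict; for each candidate B scans the property keys directly, keeping the LAST normalized match (mirroring dict overwrite), trading the upfront index for a nested scan with no auxiliary dictionary.
import Mathlib
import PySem

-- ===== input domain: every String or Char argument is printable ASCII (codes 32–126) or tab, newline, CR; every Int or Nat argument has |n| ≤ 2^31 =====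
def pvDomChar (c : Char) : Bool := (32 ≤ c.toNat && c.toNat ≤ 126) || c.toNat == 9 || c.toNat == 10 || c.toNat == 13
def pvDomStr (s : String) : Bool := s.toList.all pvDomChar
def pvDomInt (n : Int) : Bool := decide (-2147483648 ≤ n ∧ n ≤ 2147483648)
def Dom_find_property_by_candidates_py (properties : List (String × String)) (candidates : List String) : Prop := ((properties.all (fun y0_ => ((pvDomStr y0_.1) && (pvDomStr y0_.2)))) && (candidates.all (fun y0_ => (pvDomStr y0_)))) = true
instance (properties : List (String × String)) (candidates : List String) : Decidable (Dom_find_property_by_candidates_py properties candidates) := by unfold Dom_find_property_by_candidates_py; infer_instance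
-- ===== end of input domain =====

-- B drops A's precomputed normalized-key dict and instead scans the property keys per
-- candidate, keeping the last normalized match (same value as dict overwrite); alternative
-- decomposition, same return value.

-- ===== PORT A =====
-- _norm_key: key.lower().strip() then keep alphanumeric chars (shared helper of both Pythons)
def pvNormKey (key : String) : String :=
  String.mk ((PySem.Chars.strip (PySem.Chars.lower key.toList)).filter PySem.Chars.isalnum)

-- A's 'for candidate in candidates' loop over the prebuilt dict
def pvLoopA (normalized : PySem.Dict String String) : List String → Option String
  | [] => none
  | c :: rest =>
    if c = "" then pvLoopA normalized rest
    else
      let key := pvNormKey c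
      if normalized.contains key then normalized.get? key
      else pvLoopA normalized rest

def find_property_by_candidates_py (properties : List (String × String)) (candidates : List String) : Option String :=
  let normalized := properties.foldl (fun d p => d.insert (pvNormKey p.1) p.1) PySem.Dict.empty
  pvLoopA normalized candidates

-- ===== PORT B =====
-- B's inner loop: the last property key whose normalization equals `key`
def pvLastMatch (properties : List (String × String)) (key : String) : Option String :=
  properties.foldl (fun m p => if pvNormKey p.1 = key then some p.1 else m) none

def pvLoopB (properties : List (String × String)) : List String → Option String
  | [] => none
  | c :: rest =>
    if c = "" then pvLoopB properties rest
    else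
      match pvLastMatch properties (pvNormKey c) with
      | some k => some k
      | none => pvLoopB properties rest

def find_property_by_candidates_py_alt (properties : List (String × String)) (candidates : List String) : Option String :=
  pvLoopB properties candidates

-- ===== PRECONDITION & SPEC =====
def Spec_find_property_by_candidates_py (properties : List (String × String)) (candidates : List String) (out : Option String) : Prop := out = find_property_by_candidates_py_alt properties candidates
instance (properties : List (String × String)) (candidates : List String) (out : Option String) : Decidable (Spec_find_property_by_candidates_py properties candidates out) := by unfold Spec_find_property_by_candidates_py; infer_instance

-- ===== CLAIM (what is proved, stated in full; the proofs are below) =====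
def Claim_equal_find_property_by_candidates_py : Prop := ∀ (properties : List (String × String)) (candidates : List String), Dom_find_property_by_candidates_py properties candidates → Spec_find_property_by_candidates_py properties candidates (find_property_by_candidates_py properties candidates)

-- ===== LEMMAS AND PROOFS =====

-- the dict built by overwriting inserts looks up to the last matching key
theorem pv_get_foldl_insert (props : List (String × String)) (d : PySem.Dict String String) (key : String) :
    (props.foldl (fun d p => d.insert (pvNormKey p.1) p.1) d).get? key
      = props.foldl (fun m p => if pvNormKey p.1 = key then some p.1 else m) (d.get? key) := by
  induction props generalizing d with
  | nil => rfl
  | cons p ps ih =>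
    simp only [List.foldl_cons, ih]
    congr 1
    rw [PySem.Dict.get?_insert]
    by_cases h : pvNormKey p.1 = key
    · simp [h]
    · simp [h, Ne.symm h]

theorem pv_lastMatch_eq (props : List (String × String)) (key : String) :
    pvLastMatch props key
      = (props.foldl (fun d p => d.insert (pvNormKey p.1) p.1) PySem.Dict.empty).get? key := by
  rw [pv_get_foldl_insert]
  rfl

theorem pv_loops_eq (props : List (String × String)) (cands : List String) :
    pvLoopA (props.foldl (fun d p => d.insert (pvNormKey p.1) p.1) PySem.Dict.empty) cands
      = pvLoopB props cands := by
  induction cands with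
  | nil => rfl
  | cons c rest ih =>
    simp only [pvLoopA, pvLoopB]
    by_cases hc : c = ""
    · simp [hc, ih]
    · simp only [hc, if_neg hc, ite_false]
      rw [pv_lastMatch_eq]
      rw [PySem.Dict.contains_eq_isSome_get?]
      cases h : (props.foldl (fun d p => d.insert (pvNormKey p.1) p.1) PySem.Dict.empty).get? (pvNormKey c) with
      | none => simp [h, ih]
      | some v => simp [h]

-- ===== VERDICT (by name: the statement is the Claim_ definition above) =====
theorem find_property_by_candidates_py_spec : Claim_equal_find_property_by_candidates_py := by
  intro props cands _
  unfold Spec_find_property_by_candidates_py find_property_by_candidates_py find_property_by_candidates_py_alt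
  exact pv_loops_eq props cands
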